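-- pv_equiv track=rewrite | github.com/minus9d/programming_contest_archive | event/tenka1_2015/qualB/b/b.py | has_colon
-- ===== SOURCE A (Python) =====
-- def has_colon(s):
--     cnt = 0
--     for ch in s:
--         if ch == "{":
--             cnt += 1
--         elif ch == "}":
--             cnt -= 1
--         elif ch == ":":
--             if cnt == 0:
--                 return True
--     return False
-- ===== SOURCE B (Python) =====
-- def has_colon(s):
--     for i, ch in enumerate(s):
--         if ch == ":" and s[:i].count("{") == s[:i].count("}"):
--             return True
--     return False
-- ===== Notes on version B (the rewrite author's own statement) =====
-- stated objective: alternative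
-- what changed: Replaces the single-pass incremental depth counter with an enumerate loop that, at each colon, recomputes the prefix brace balance via s[:i].count, returning True at the first balanced top-level colon.
import Mathlib
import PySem

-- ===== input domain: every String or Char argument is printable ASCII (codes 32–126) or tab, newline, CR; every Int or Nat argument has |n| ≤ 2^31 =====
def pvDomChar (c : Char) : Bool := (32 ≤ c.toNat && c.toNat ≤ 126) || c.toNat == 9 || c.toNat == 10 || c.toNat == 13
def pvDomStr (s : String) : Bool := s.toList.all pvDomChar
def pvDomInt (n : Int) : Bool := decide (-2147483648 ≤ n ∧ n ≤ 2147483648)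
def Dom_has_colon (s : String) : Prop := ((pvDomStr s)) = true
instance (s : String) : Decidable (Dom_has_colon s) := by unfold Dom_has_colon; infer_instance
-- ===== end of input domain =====

-- B replaces A's single-pass incremental depth counter by an enumerate loop that, at each colon,
-- recomputes the prefix brace balance with s[:i].count; alternative decomposition, not claimed faster.


-- ===== PORT A =====
-- A's for-loop over the characters with its running counter `cnt` and early return.
def hasColonLoopA (cnt : Int) : List Char → Bool
  | [] => false
  | ch :: rest =>
    if ch = '{' then hasColonLoopA (cnt + 1) rest
    else if ch = '}' then hasColonLoopA (cnt - 1) rest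
    else if ch = ':' then (if cnt = 0 then true else hasColonLoopA cnt rest)
    else hasColonLoopA cnt rest

def has_colon (s : String) : Bool := hasColonLoopA 0 s.toList

-- ===== PORT B =====
-- B's for-loop over enumerate(s); s[:i] is PySem.List.slice, str.count is PySem.Chars.count.
def hasColonLoopB (full : List Char) : List (Int × Char) → Bool
  | [] => false
  | (i, ch) :: rest =>
    if ch = ':' ∧ PySem.Chars.count (PySem.List.slice full none (some i)) ['{']
                 = PySem.Chars.count (PySem.List.slice full none (some i)) ['}'] then true
    else hasColonLoopB full rest

def has_colon_alt (s : String) : Bool :=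
  hasColonLoopB s.toList (PySem.List.enumerate s.toList 0)

-- ===== PRECONDITION & SPEC =====
def Spec_has_colon (s : String) (out : Bool) : Prop := out = has_colon_alt s
instance (s : String) (out : Bool) : Decidable (Spec_has_colon s out) := by unfold Spec_has_colon; infer_instance

-- ===== CLAIM (what is proved, stated in full; the proofs are below) =====
def Claim_equal_has_colon : Prop := ∀ (s : String), Dom_has_colon s → Spec_has_colon s (has_colon s)

-- ===== LEMMAS AND PROOFS =====

-- Counting a single-character substring is counting the character.
lemma chars_count_go_singleton (c : Char) :
    ∀ (fuel : Nat) (l : List Char) (acc : Nat), l.length ≤ fuel →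
      PySem.Chars.count.go [c] fuel l acc = acc + l.count c := by
  intro fuel
  induction fuel with
  | zero =>
    intro l acc h
    cases l with
    | nil => simp [PySem.Chars.count.go]
    | cons a t => simp at h
  | succ n ih =>
    intro l acc h
    cases l with
    | nil => simp [PySem.Chars.count.go]
    | cons a t =>
      by_cases hc : c = a
      · subst hc
        simp only [PySem.Chars.count.go, List.isPrefixOf, BEq.rfl, Bool.true_and,
          if_true, List.length_cons, List.length_nil, List.drop_succ_cons, List.drop_zero]
        rw [ih t (acc + 1) (by simpa using h)]
        simp
        omega
      · have hpre : ([c].isPrefixOf (a :: t)) = false := by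
          simp [List.isPrefixOf, hc]
        simp only [PySem.Chars.count.go, hpre]
        rw [ih t acc (by simpa using h)]
        simp [Ne.symm hc]

lemma chars_count_singleton (l : List Char) (c : Char) :
    PySem.Chars.count l [c] = l.count c := by
  simpa using chars_count_go_singleton c l.length l 0 le_rfl

-- Main loop correspondence: processing `rest` after the prefix `pref`.
lemma loops_eq (rest : List Char) :
    ∀ (pref : List Char),
      hasColonLoopB (pref ++ rest) (PySem.List.enumerate rest (pref.length : Int))
        = hasColonLoopA ((pref.count '{' : Int) - (pref.count '}' : Int)) rest := by
  induction rest with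
  | nil => intro pref; simp [PySem.List.enumerate_nil, hasColonLoopB, hasColonLoopA]
  | cons ch rest ih =>
    intro pref
    rw [PySem.List.enumerate_cons]
    have hslice : PySem.List.slice (pref ++ ch :: rest) none (some (pref.length : Int)) = pref := by
      rw [PySem.List.slice_to_natCast]
      simp
    have hihcall : hasColonLoopB (pref ++ ch :: rest)
        (PySem.List.enumerate rest ((pref.length : Int) + 1))
        = hasColonLoopA (((pref ++ [ch]).count '{' : Int) - ((pref ++ [ch]).count '}' : Int)) rest := by
      have := ih (pref ++ [ch])
      simpa [List.append_assoc, List.length_append, Int.natCast_add] using this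
    simp only [hasColonLoopB, hslice, chars_count_singleton]
    by_cases hcol : ch = ':'
    · subst hcol
      by_cases hbal : pref.count '{' = pref.count '}'
      · simp [hasColonLoopA, hbal]
      · have hne : ((pref.count '{' : Int) - (pref.count '}' : Int)) ≠ 0 := by
          intro h; apply hbal; omega
        rw [if_neg (by simp [hbal]), hihcall]
        have e1 : List.count '{' (pref ++ [':']) = List.count '{' pref := by
          simp [List.count_append]
        have e2 : List.count '}' (pref ++ [':']) = List.count '}' pref := by
          simp [List.count_append]
        rw [e1, e2]
        conv_rhs => rw [hasColonLoopA]
        rw [if_neg (by decide), if_neg (by decide), if_pos rfl, if_neg hne]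
    · rw [if_neg (by simp [hcol]), hihcall]
      by_cases h1 : ch = '{'
      · subst h1
        have e1 : List.count '{' (pref ++ ['{']) = List.count '{' pref + 1 := by
          simp [List.count_append]
        have e2 : List.count '}' (pref ++ ['{']) = List.count '}' pref := by
          simp [List.count_append]
        rw [e1, e2]
        conv_rhs => rw [hasColonLoopA]
        rw [if_pos rfl]
        congr 1
        push_cast; ring
      · by_cases h2 : ch = '}'
        · subst h2
          have e1 : List.count '{' (pref ++ ['}']) = List.count '{' pref := by
            simp [List.count_append]
          have e2 : List.count '}' (pref ++ ['}']) = List.count '}' pref + 1 := by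
            simp [List.count_append]
          rw [e1, e2]
          conv_rhs => rw [hasColonLoopA]
          rw [if_neg (by decide), if_pos rfl]
          congr 1
          push_cast; ring
        · have e1 : List.count '{' (pref ++ [ch]) = List.count '{' pref := by
            simp [List.count_append, h1]
          have e2 : List.count '}' (pref ++ [ch]) = List.count '}' pref := by
            simp [List.count_append, h2]
          rw [e1, e2]
          conv_rhs => rw [hasColonLoopA]
          rw [if_neg h1, if_neg h2, if_neg hcol]

-- ===== VERDICT (by name: the statement is the Claim_ definition above) =====
theorem has_colon_spec : Claim_equal_has_colon := by
  intro s _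
  unfold Spec_has_colon has_colon has_colon_alt
  have := loops_eq s.toList []
  simpa using this.symm
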